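-- pv_equiv track=rewrite | github.com/lemontime0106/Algorithm | 프로그래머스/2/138476. 귤 고르기/귤 고르기.py | solution
-- ===== SOURCE A (Python) =====
-- def solution(k, tangerine):
--     number = {}
--
--     for i in tangerine:
--         if i not in number:
--             number[i] = 1
--         else:
--             number[i] += 1
--
--     sorted_number = sorted(number.values(), reverse=True)
--
--     answer = 0
--     cnt = 0
--
--     for count in sorted_number:
--         cnt += count
--         answer += 1
--         if cnt >= k:
--             break
--
--     return answer
-- ===== SOURCE B (Python) =====
-- def solution(k, tangerine):
--     number = {}
--     for i in tangerine:
--         number[i] = number.get(i, 0) + 1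
--
--     n = len(tangerine)
--     bucket = {}
--     for c in number.values():
--         bucket[c] = bucket.get(c, 0) + 1
--
--     answer = 0
--     cnt = 0
--     for c in range(n, 0, -1):
--         for _ in range(bucket.get(c, 0)):
--             cnt += c
--             answer += 1
--             if cnt >= k:
--                 return answer
--     return answer
-- ===== Notes on version B (the rewrite author's own statement) =====
-- stated objective: alternative
-- what changed: Replaces A's comparison sort of the group sizes by a counting sort: a frequency-of-frequencies dict is built and the greedy loop walks the possible counts from len(tangerine) down to 1, consuming one group at a time until k is covered.
import Mathlib
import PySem

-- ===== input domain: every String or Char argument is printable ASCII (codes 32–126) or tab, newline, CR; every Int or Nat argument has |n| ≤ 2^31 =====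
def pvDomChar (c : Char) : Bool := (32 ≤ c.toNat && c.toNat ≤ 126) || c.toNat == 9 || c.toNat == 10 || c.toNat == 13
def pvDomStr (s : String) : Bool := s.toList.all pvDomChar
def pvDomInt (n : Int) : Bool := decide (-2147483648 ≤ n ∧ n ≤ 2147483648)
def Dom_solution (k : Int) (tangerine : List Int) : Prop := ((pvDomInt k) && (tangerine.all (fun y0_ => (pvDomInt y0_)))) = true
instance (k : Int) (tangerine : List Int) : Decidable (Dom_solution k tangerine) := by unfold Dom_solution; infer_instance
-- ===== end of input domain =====

-- B replaces A's comparison sort of the group sizes by a counting-sort over a frequency-of-frequencies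
-- dict, consuming the groups one at a time from the largest count downward (objective: alternative).

-- ===== PORT A =====
-- A's greedy loop with break: 'for count in sorted_number: cnt += count; answer += 1; if cnt >= k: break'
def solutionLoopA (k : Int) : List Int → Int → Int → Int
  | [], answer, _ => answer
  | count :: rest, answer, cnt =>
      let cnt' := cnt + count
      let answer' := answer + 1
      if cnt' ≥ k then answer' else solutionLoopA k rest answer' cnt'

def solution (k : Int) (tangerine : List Int) : Int :=
  let number := tangerine.foldl (fun d i =>
    if d.contains i = false then d.insert i 1 else d.modify i 0 (fun v => v + 1)) PySem.Dict.empty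
  let sorted_number := PySem.List.sorted number.values (fun x => x) true
  solutionLoopA k sorted_number 0 0

-- ===== PORT B =====
-- inner 'for _ in range(bucket.get(c, 0))': .inl = early 'return answer', .inr = loop state at the end
def solutionInnerB (k c : Int) : Nat → Int → Int → Sum Int (Int × Int)
  | 0, answer, cnt => .inr (answer, cnt)
  | m + 1, answer, cnt =>
      let cnt' := cnt + c
      let answer' := answer + 1
      if cnt' ≥ k then .inl answer' else solutionInnerB k c m answer' cnt'

-- outer 'for c in range(n, 0, -1)'
def solutionOuterB (k : Int) (g : Int → Int) : List Int → Int → Int → Int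
  | [], answer, _ => answer
  | c :: cs, answer, cnt =>
      match solutionInnerB k c (g c).toNat answer cnt with
      | .inl a => a
      | .inr (a, cn) => solutionOuterB k g cs a cn

def solution_alt (k : Int) (tangerine : List Int) : Int :=
  let number := tangerine.foldl (fun d i => d.insert i (d.getD i 0 + 1)) PySem.Dict.empty
  let n := PySem.List.len tangerine
  let bucket := number.values.foldl (fun d c => d.insert c (d.getD c 0 + 1)) PySem.Dict.empty
  -- 'for _ in range(m)' iterates m.toNat times (counts are never negative)
  solutionOuterB k (fun c => bucket.getD c 0) (PySem.List.pyRange n 0 (-1)) 0 0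

-- ===== PRECONDITION & SPEC =====
def Spec_solution (k : Int) (tangerine : List Int) (out : Int) : Prop := out = solution_alt k tangerine
instance (k : Int) (tangerine : List Int) (out : Int) : Decidable (Spec_solution k tangerine out) := by unfold Spec_solution; infer_instance

-- ===== CLAIM (what is proved, stated in full; the proofs are below) =====
def Claim_equal_solution : Prop := ∀ (k : Int) (tangerine : List Int), Dom_solution k tangerine → Spec_solution k tangerine (solution k tangerine)

-- ===== LEMMAS AND PROOFS =====

-- A's dict-building loop is collections.Counter
lemma dictA_eq_counter (tangerine : List Int) :
    tangerine.foldl (fun d i =>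
      if d.contains i = false then d.insert i 1 else d.modify i 0 (fun v => v + 1)) PySem.Dict.empty
    = PySem.Dict.counter tangerine := by
  rw [PySem.Dict.counter_eq_foldl]
  apply PySem.List.foldl_congr_mem
  intro d x _
  by_cases h : d.contains x
  · simp [h]
  · simp only [Bool.not_eq_true] at h
    simp [h, PySem.Dict.modify, PySem.Dict.getD_of_not_contains d 0 h]

-- the values of Counter(xs), in first-occurrence order
lemma counter_values (xs : List Int) :
    (PySem.Dict.counter xs).values = (PySem.Set.ofList xs).map (fun v => ((List.count v xs : Nat) : Int)) := by
  simp [PySem.Dict.values, PySem.Dict.items_counter]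

-- running A's loop on a block of m copies of c, then the rest
lemma loopA_replicate (k c : Int) (m : Nat) :
    ∀ (rest : List Int) (answer cnt : Int),
      solutionLoopA k (List.replicate m c ++ rest) answer cnt
      = match solutionInnerB k c m answer cnt with
        | .inl a => a
        | .inr (a, cn) => solutionLoopA k rest a cn := by
  induction m with
  | zero => intro rest answer cnt; simp [solutionInnerB]
  | succ m ih =>
      intro rest answer cnt
      simp only [List.replicate_succ, List.cons_append, solutionLoopA, solutionInnerB]
      by_cases h : cnt + c ≥ k
      · simp [h]
      · simp [h, ih]

-- B's double loop is A's loop on the flattened block list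
lemma outerB_eq_loopA (k : Int) (g : Int → Int) :
    ∀ (cs : List Int) (answer cnt : Int),
      solutionOuterB k g cs answer cnt
      = solutionLoopA k (cs.flatMap (fun c => List.replicate (g c).toNat c)) answer cnt := by
  intro cs
  induction cs with
  | nil => intro answer cnt; simp [solutionOuterB, solutionLoopA, List.flatMap]
  | cons c cs ih =>
      intro answer cnt
      rw [List.flatMap_cons, loopA_replicate]
      simp only [solutionOuterB]
      cases hinner : solutionInnerB k c (g c).toNat answer cnt with
      | inl a => simp
      | inr p => cases p with | mk a cn => simp [ih]

-- counting elements of the flattened block list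
lemma count_flatMap_replicate (g : Int → Nat) :
    ∀ (cs : List Int), cs.Nodup → ∀ (a : Int),
      (cs.flatMap (fun c => List.replicate (g c) c)).count a = if a ∈ cs then g a else 0 := by
  intro cs
  induction cs with
  | nil => intro _ a; simp
  | cons c cs ih =>
      intro hnd a
      rw [List.flatMap_cons, List.count_append]
      rcases List.nodup_cons.mp hnd with ⟨hc, hnd'⟩
      by_cases h : a = c
      · subst h
        simp [ih hnd', hc]
      · simp [List.count_replicate, ih hnd', h, Ne.symm h]

-- every value of Counter(tangerine) lies in 1..len(tangerine)
lemma counter_value_bounds (tangerine : List Int) (v : Int)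
    (hv : v ∈ (PySem.Dict.counter tangerine).values) :
    1 ≤ v ∧ v ≤ (tangerine.length : Int) := by
  rw [counter_values] at hv
  rcases List.mem_map.mp hv with ⟨x, hx, rfl⟩
  rw [PySem.Set.mem_ofList] at hx
  constructor
  · exact_mod_cast List.count_pos_iff.mpr hx
  · exact_mod_cast List.count_le_length

-- the flattened block list is a permutation of the counter's values
lemma flat_perm_values (tangerine : List Int) :
    ((PySem.List.pyRange (tangerine.length : Int) 0 (-1)).flatMap
      (fun c => List.replicate ((PySem.Dict.counter tangerine).values.count c) c)).Perm
    (PySem.Dict.counter tangerine).values := by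
  rw [List.perm_iff_count]
  intro a
  have hnd : (PySem.List.pyRange (tangerine.length : Int) 0 (-1)).Nodup := by
    rw [PySem.List.pyRange_neg_one_eq_reverse]
    exact List.nodup_reverse.mpr (PySem.List.nodup_pyRange_one _ _)
  rw [count_flatMap_replicate (fun c => (PySem.Dict.counter tangerine).values.count c) _ hnd a]
  by_cases hm : a ∈ PySem.List.pyRange (tangerine.length : Int) 0 (-1)
  · simp [hm]
  · simp only [hm, if_false]
    symm
    rw [List.count_eq_zero]
    intro ha
    rcases counter_value_bounds tangerine a ha with ⟨h1, h2⟩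
    exact hm (PySem.List.mem_pyRange_neg_one.mpr ⟨by omega, h2⟩)

-- the flattened block list is nonincreasing
lemma flat_pairwise (tangerine : List Int) :
    ((PySem.List.pyRange (tangerine.length : Int) 0 (-1)).flatMap
      (fun c => List.replicate ((PySem.Dict.counter tangerine).values.count c) c)).Pairwise
    (fun a b => b ≤ a) := by
  rw [List.flatMap_def, List.pairwise_flatten]
  constructor
  · intro l hl
    rcases List.mem_map.mp hl with ⟨c, _, rfl⟩
    exact List.pairwise_replicate.mpr (Or.inr le_rfl)
  · have hp : (PySem.List.pyRange (tangerine.length : Int) 0 (-1)).Pairwise (fun a b => b < a) := by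
      rw [PySem.List.pyRange_neg_one_eq_reverse, List.pairwise_reverse]
      exact PySem.List.pairwise_lt_pyRange_one _ _
    rw [List.pairwise_map]
    refine hp.imp_of_mem ?_
    intro c1 c2 _ _ hlt x hx y hy
    rw [List.eq_of_mem_replicate hx, List.eq_of_mem_replicate hy]
    exact le_of_lt hlt

-- Python's sorted(values, reverse=True) IS the flattened block list
lemma sorted_eq_flat (tangerine : List Int) :
    PySem.List.sorted (PySem.Dict.counter tangerine).values (fun x => x) true
    = (PySem.List.pyRange (tangerine.length : Int) 0 (-1)).flatMap
        (fun c => List.replicate ((PySem.Dict.counter tangerine).values.count c) c) := by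
  apply PySem.List.eq_of_perm_of_pairwise_le_of_injective (fun x : Int => -x) neg_injective
  · exact (PySem.List.sorted_perm _ _ _).trans (flat_perm_values tangerine).symm
  · have h := PySem.List.sorted_pairwise_rev (PySem.Dict.counter tangerine).values (fun x => x)
    exact h.imp (by intro a b hba; simpa using hba)
  · exact (flat_pairwise tangerine).imp (by intro a b hba; simpa using hba)

-- ===== VERDICT (by name: the statement is the Claim_ definition above) =====
theorem solution_spec : Claim_equal_solution := by
  intro k tangerine _
  unfold Spec_solution solution solution_alt
  simp only [dictA_eq_counter, PySem.Dict.foldl_insert_getD_add_one_eq_counter, outerB_eq_loopA]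
  simp only [PySem.Dict.getD_counter, Int.toNat_natCast, PySem.List.len_eq]
  rw [sorted_eq_flat]
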